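-- pv_equiv track=rewrite | github.com/alexandraback/datacollection | solutions_5631989306621952_0/Python/willothewisp/A.py | go
-- ===== SOURCE A (Python) =====
-- from collections import deque
--
-- def go(S):
--     a = deque()
--     for c in S:
--         if a and a[0] <= c:
--             a.appendleft(c)
--         else:
--             a.append(c)
--     return ''.join(a)
-- ===== SOURCE B (Python) =====
-- def go(S):
--     if not S:
--         return ""
--     n = len(S)
--     # pass 1: m[i] = max(S[0..i]) (prefix maxima)
--     m = [S[0]] * n
--     for i in range(1, n):
--         m[i] = m[i-1] if m[i-1] > S[i] else S[i]
--     # pass 2/3: a position i>=1 is a "record" iff S[i] >= max(S[:i]) = m[i-1]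
--     records = [S[i] for i in range(1, n) if S[i] >= m[i-1]]
--     rest = [S[i] for i in range(1, n) if S[i] < m[i-1]]
--     return ''.join(reversed(records)) + S[0] + ''.join(rest)
-- ===== Notes on version B (the rewrite author's own statement) =====
-- stated objective: alternative
-- what changed: Instead of simulating the deque, B uses the characterization that the deque front is always the running prefix maximum: it computes the prefix-max array in one pass, then selects the prefix-max records (S[i] >= max(S[:i])) and non-records by comprehensions, returning reversed(records) + S[0] + non-records.
import Mathlib
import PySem

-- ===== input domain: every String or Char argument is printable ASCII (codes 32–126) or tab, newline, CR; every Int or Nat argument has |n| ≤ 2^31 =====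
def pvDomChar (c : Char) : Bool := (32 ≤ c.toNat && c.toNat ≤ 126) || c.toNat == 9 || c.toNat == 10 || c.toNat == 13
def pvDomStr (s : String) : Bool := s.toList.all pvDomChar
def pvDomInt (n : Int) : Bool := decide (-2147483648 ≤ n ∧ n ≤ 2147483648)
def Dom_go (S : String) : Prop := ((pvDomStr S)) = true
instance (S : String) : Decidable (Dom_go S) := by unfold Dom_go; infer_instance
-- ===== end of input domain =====

-- B drops the deque simulation entirely: the deque front is always the running prefix
-- maximum, so B computes the prefix-max array and reassembles the answer from the
-- prefix-max records and non-records in staged passes (objective: alternative).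

-- ===== PORT A =====
-- one loop step of A: deque as a list; appendleft = cons, append = ++ [c]
def goStepA (a : List Char) (c : Char) : List Char :=
  match a with
  | [] => a ++ [c]
  | h :: _ => if h ≤ c then c :: a else a ++ [c]

def go (S : String) : String :=
  String.ofList (S.toList.foldl goStepA [])

-- ===== PORT B =====
-- pass 1 of B: prefix maxima m[1..n-1], given m[0] = first char (prev) and the tail
def goPrefixMax (prev : Char) (rest : List Char) : List Char :=
  match rest with
  | [] => []
  | c :: t =>
    let m := if prev > c then prev else c
    m :: goPrefixMax m t

def go_alt (S : String) : String :=
  match S.toList with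
  | [] => ""
  | h :: t =>
    let m := goPrefixMax h t
    -- pair each tail char S[i] with m[i-1]; h :: m truncated by zip gives exactly that
    let pm := t.zip (h :: m)
    let records := (pm.filter (fun x => x.2 ≤ x.1)).map Prod.fst
    let rest := (pm.filter (fun x => x.1 < x.2)).map Prod.fst
    String.ofList (records.reverse ++ h :: rest)

-- ===== PRECONDITION & SPEC =====
def Spec_go (S : String) (out : String) : Prop := out = go_alt S
instance (S : String) (out : String) : Decidable (Spec_go S out) := by unfold Spec_go; infer_instance

-- ===== CLAIM (what is proved, stated in full; the proofs are below) =====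
def Claim_equal_go : Prop := ∀ (S : String), Dom_go S → Spec_go S (go S)

-- ===== LEMMAS AND PROOFS =====

-- specification-side record/non-record selectors w.r.t. a running maximum p
def recs : List Char → Char → List Char
  | [], _ => []
  | c :: t, p => if p ≤ c then c :: recs t c else recs t p

def nonrecs : List Char → Char → List Char
  | [], _ => []
  | c :: t, p => if p ≤ c then nonrecs t c else c :: nonrecs t p

-- A's deque always has the running maximum p at the front; its fold appends records
-- (reversed) at the front and non-records at the back
theorem goStepA_key (cs : List Char) : ∀ (p : Char) (rest : List Char),
    cs.foldl goStepA (p :: rest) = (recs cs p).reverse ++ p :: rest ++ nonrecs cs p := by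
  induction cs with
  | nil => intro p rest; simp [recs, nonrecs]
  | cons c cs ih =>
    intro p rest
    by_cases h : p ≤ c
    · simp [goStepA, recs, nonrecs, h, ih c (p :: rest)]
    · simpa [goStepA, recs, nonrecs, h, List.append_assoc] using ih p (rest ++ [c])

-- B's zip/filter passes compute exactly recs / nonrecs
theorem zip_filter_recs (t : List Char) : ∀ (h : Char),
    ((t.zip (h :: goPrefixMax h t)).filter (fun x => x.2 ≤ x.1)).map Prod.fst = recs t h := by
  induction t with
  | nil => intro h; simp [recs]
  | cons c t ih =>
    intro h
    by_cases hle : h ≤ c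
    · have hm : (if h > c then h else c) = c := by
        simp [show ¬ h > c from not_lt.mpr hle]
      simp [goPrefixMax, recs, hle, hm, ih c]
    · have hm : (if h > c then h else c) = h := by
        simp [lt_of_not_ge (by simpa using hle)]
      simp [goPrefixMax, recs, hle, hm, ih h]

theorem zip_filter_nonrecs (t : List Char) : ∀ (h : Char),
    ((t.zip (h :: goPrefixMax h t)).filter (fun x => x.1 < x.2)).map Prod.fst = nonrecs t h := by
  induction t with
  | nil => intro h; simp [nonrecs]
  | cons c t ih =>
    intro h
    by_cases hle : h ≤ c
    · have hm : (if h > c then h else c) = c := by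
        simp [show ¬ h > c from not_lt.mpr hle]
      simp [goPrefixMax, nonrecs, hle, not_lt.mpr hle, ih c]
    · have hm : (if h > c then h else c) = h := by
        simp [lt_of_not_ge (by simpa using hle)]
      simp [goPrefixMax, nonrecs, hle, lt_of_not_ge (by simpa using hle), ih h]

-- ===== VERDICT (by name: the statement is the Claim_ definition above) =====
theorem go_spec : Claim_equal_go := by
  intro S _
  unfold Spec_go go go_alt
  cases hS : S.toList with
  | nil => rfl
  | cons h t =>
    simp only [List.foldl_cons]
    have hfirst : goStepA [] h = [h] := by simp [goStepA]
    rw [hfirst, goStepA_key t h [], zip_filter_recs t h, zip_filter_nonrecs t h]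
    simp
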